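-- pv_equiv track=rewrite | github.com/eriksonJAguiar/Computacao-Grafica | ocr_python_opencv/certificados_ocr.py | getOrganizador
-- ===== SOURCE A (Python) =====
-- def levenshtein(a,b):
--     #"Calculates the Levenshtein distance between a and b."
--     n, m = len(a), len(b)
--     if n > m:
--         # Make sure n <= m, to use O(min(n,m)) space
--         a,b = b,a
--         n,m = m,n
--
--     current = range(n+1)
--     for i in range(1,m+1):
--         previous, current = current, [i]+[0]*n
--         for j in range(1,n+1):
--             add, delete = previous[j]+1, current[j-1]+1
--             change = previous[j-1]
--             if a[j-1] != b[i-1]: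
--                 change = change + 1
--             current[j] = min(add, delete, change)
--
--     return current[n]
--
-- def verificaSimilaridade(str,tokens):
--
--     for t in tokens:
--         if levenshtein(t,str) < 2:
--             return t
--
-- def getOrganizador(tokens):
--
--     word_organizador = []
--
--     word_organizador.append(verificaSimilaridade('durante',tokens))
--     word_organizador.append(verificaSimilaridade('realizado',tokens))
--
--
--     organizador = ''
--     i = 0
--     for t in tokens:
--
--         if t in word_organizador:
--
--             organizador += tokens[i+1] +' '+ tokens[i+2] + ' ' + tokens[i+3]
--
--             return organizador
--
--         i += 1
-- ===== SOURCE B (Python) =====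
-- def _within1(a, b):
--     # edit distance <= 1, decided by one O(len) scan instead of the DP table
--     if len(a) - len(b) > 1 or len(b) - len(a) > 1:
--         return False
--     i = 0
--     while i < len(a) and i < len(b) and a[i] == b[i]:
--         i += 1
--     # first mismatch at i (or one string exhausted): one substitution, insertion or deletion
--     return a[i+1:] == b[i+1:] or a[i:] == b[i+1:] or a[i+1:] == b[i:]
--
-- def getOrganizador(tokens):
--     # single fuzzy-matching pass; no Levenshtein DP, no word_organizador list, no rescan
--     for i, t in enumerate(tokens):
--         if _within1(t, 'durante') or _within1(t, 'realizado'):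
--             return tokens[i+1] + ' ' + tokens[i+2] + ' ' + tokens[i+3]
-- ===== Notes on version B (the rewrite author's own statement) =====
-- stated objective: faster
-- what changed: Replaces the Levenshtein DP table and the two verificaSimilaridade pre-scans plus membership rescan by a single pass over tokens that decides 'edit distance <= 1' directly with an O(length) common-prefix skip and three suffix comparisons.
import Mathlib
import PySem

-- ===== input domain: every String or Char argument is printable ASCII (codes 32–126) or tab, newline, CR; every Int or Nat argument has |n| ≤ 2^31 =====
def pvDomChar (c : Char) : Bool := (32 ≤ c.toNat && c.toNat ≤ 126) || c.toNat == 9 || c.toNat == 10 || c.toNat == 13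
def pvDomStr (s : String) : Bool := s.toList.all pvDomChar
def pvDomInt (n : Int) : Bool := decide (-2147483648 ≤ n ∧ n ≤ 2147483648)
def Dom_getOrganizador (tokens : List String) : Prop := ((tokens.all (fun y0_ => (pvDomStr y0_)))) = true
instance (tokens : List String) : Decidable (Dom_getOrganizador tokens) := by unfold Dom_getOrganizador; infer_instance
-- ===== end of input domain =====

-- B replaces the two Levenshtein-DP pre-scans plus membership rescan by a single pass that
-- decides "edit distance ≤ 1" with an O(length) common-prefix/suffix scan (no DP table at all).

-- ===== PORT A =====
-- literal port of the module helper levenshtein (row DP)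
def pvLevInnerStep (al : List Char) (bi : Char) (previous : List Int) (cur : List Int) (j : Nat) : List Int :=
  let add := previous.getD (j+1) 0 + 1
  let delete := cur.getD j 0 + 1
  let change0 := previous.getD j 0
  let change := if al.getD j ' ' ≠ bi then change0 + 1 else change0
  cur ++ [min (min add delete) change]

def pvLev (a b : String) : Int :=
  let al := a.toList
  let bl := b.toList
  let n := al.length
  let m := bl.length
  -- if n > m: swap so that n ≤ m
  let p := if n > m then (bl, al, m, n) else (al, bl, n, m)
  let al := p.1; let bl := p.2.1; let n := p.2.2.1; let m := p.2.2.2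
  let current : List Int := (List.range (n+1)).map (fun k => Int.ofNat k)
  let current := (List.range m).foldl (fun previous i =>
      (List.range n).foldl (pvLevInnerStep al (bl.getD i ' ') previous) [((i : Int) + 1)]) current
  current.getD n 0

def pvVerificaSimilaridade (str : String) (tokens : List String) : Option String :=
  tokens.find? (fun t => decide (pvLev t str < 2))

-- A's scan over tokens with running index i; `none` at the pyGet? stands for IndexError (excluded by Pre_)
def pvGetOrgLoop (tokens : List String) (w1 w2 : Option String) (rest : List String) (i : Nat) : Option String :=
  match rest with
  | [] => none
  | t :: rs =>
    if some t = w1 ∨ some t = w2 then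
      match PySem.List.pyGet? tokens ((i : Int) + 1), PySem.List.pyGet? tokens ((i : Int) + 2),
            PySem.List.pyGet? tokens ((i : Int) + 3) with
      | some x, some y, some z => some ("" ++ x ++ " " ++ y ++ " " ++ z)
      | _, _, _ => none
    else pvGetOrgLoop tokens w1 w2 rs (i + 1)

def getOrganizador (tokens : List String) : Option String :=
  let w1 := pvVerificaSimilaridade "durante" tokens
  let w2 := pvVerificaSimilaridade "realizado" tokens
  pvGetOrgLoop tokens w1 w2 tokens 0

-- ===== PORT B =====
-- the while loop of _within1: drop the common prefix of both lists
def pvSkip : List Char → List Char → List Char × List Char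
  | x :: xs, y :: ys => if x = y then pvSkip xs ys else (x :: xs, y :: ys)
  | xs, ys => (xs, ys)

-- _within1 on char lists; a[i:] is the first component of pvSkip, a[i+1:] its tail (drop 1)
def pvW1Core (al bl : List Char) : Bool :=
  if (al.length : Int) - bl.length > 1 ∨ (bl.length : Int) - al.length > 1 then false
  else
    let p := pvSkip al bl
    (p.1.drop 1 == p.2.drop 1) || (p.1 == p.2.drop 1) || (p.1.drop 1 == p.2)

def pvWithin1 (a b : String) : Bool := pvW1Core a.toList b.toList

-- B's single fuzzy-matching pass
def pvAltLoop (tokens : List String) (rest : List String) (i : Nat) : Option String :=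
  match rest with
  | [] => none
  | t :: rs =>
    if pvWithin1 t "durante" || pvWithin1 t "realizado" then
      match PySem.List.pyGet? tokens ((i : Int) + 1), PySem.List.pyGet? tokens ((i : Int) + 2),
            PySem.List.pyGet? tokens ((i : Int) + 3) with
      | some x, some y, some z => some (x ++ " " ++ y ++ " " ++ z)
      | _, _, _ => none
    else pvAltLoop tokens rs (i + 1)

def getOrganizador_alt (tokens : List String) : Option String :=
  pvAltLoop tokens tokens 0

-- ===== PRECONDITION & SPEC =====
-- Pre_ excludes exactly the inputs where both Pythons raise IndexError: the first fuzzy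
-- match (distance < 2 to 'durante' or 'realizado') occurs within the last three tokens.
def Pre_getOrganizador (tokens : List String) : Prop :=
  ∀ i, tokens.findIdx? (fun t => decide (pvLev t "durante" < 2) || decide (pvLev t "realizado" < 2)) = some i →
    i + 4 ≤ tokens.length
instance (tokens : List String) : Decidable (Pre_getOrganizador tokens) := by
  unfold Pre_getOrganizador; infer_instance

def pvWitness_getOrganizador : List String := ["texto", "durante", "a", "b", "c"]

def Spec_getOrganizador (tokens : List String) (out : Option String) : Prop := out = getOrganizador_alt tokens
instance (tokens : List String) (out : Option String) : Decidable (Spec_getOrganizador tokens out) := by unfold Spec_getOrganizador; infer_instance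

-- ===== CLAIM (what is proved, stated in full; the proofs are below) =====
def Claim_equal_getOrganizador : Prop := ∀ (tokens : List String), Dom_getOrganizador tokens → Pre_getOrganizador tokens → Spec_getOrganizador tokens (getOrganizador tokens)

-- ===== LEMMAS AND PROOFS =====

-- the textbook recursive Levenshtein distance (proof-only reference function)
def pvLevMath : List Char → List Char → Nat
  | [], ys => ys.length
  | _ :: xs, [] => xs.length + 1
  | x :: xs, y :: ys =>
      min (1 + pvLevMath xs (y :: ys))
        (min (1 + pvLevMath (x :: xs) ys) ((if x = y then 0 else 1) + pvLevMath xs ys))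
termination_by x y => x.length + y.length
decreasing_by all_goals (simp only [List.length_cons]; omega)

lemma pvLevMath_cons_cons (a b : Char) (as bs : List Char) :
    pvLevMath (a :: as) (b :: bs)
      = min (1 + pvLevMath as (b :: bs))
          (min (1 + pvLevMath (a :: as) bs) ((if a = b then 0 else 1) + pvLevMath as bs)) := by
  rw [pvLevMath]

lemma pvLevMath_self (x : List Char) : pvLevMath x x = 0 := by
  induction x with
  | nil => simp [pvLevMath]
  | cons c xs ih => simp [pvLevMath, ih]

lemma pvLevMath_eq_zero (x : List Char) : ∀ y, (pvLevMath x y = 0 ↔ x = y) := by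
  induction x with
  | nil =>
    intro y; cases y with
    | nil => simp [pvLevMath]
    | cons b ys => simp [pvLevMath]
  | cons a xs ih =>
    intro y; cases y with
    | nil => simp [pvLevMath]
    | cons b ys =>
      simp only [pvLevMath]
      constructor
      · intro h
        have hmin : (if a = b then 0 else 1) + pvLevMath xs ys = 0 := by omega
        by_cases hab : a = b
        · simp [hab] at hmin
          simp [hab, (ih ys).mp hmin]
        · simp [hab] at hmin
      · rintro h
        injection h with h1 h2
        subst h1; subst h2
        simp [pvLevMath_self]

lemma pvLevMath_cons_self (c : Char) (x : List Char) : pvLevMath (c :: x) x ≤ 1 := by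
  cases x with
  | nil => simp [pvLevMath]
  | cons d xs =>
    have h := pvLevMath_self (d :: xs)
    rw [pvLevMath_cons_cons]
    omega

lemma pvLevMath_self_cons (c : Char) (x : List Char) : pvLevMath x (c :: x) ≤ 1 := by
  cases x with
  | nil => simp [pvLevMath]
  | cons d xs =>
    have h := pvLevMath_self (d :: xs)
    rw [pvLevMath_cons_cons]
    omega

lemma pvW1Core_nil_left (y : List Char) : pvW1Core [] y = true ↔ y.length ≤ 1 := by
  match y with
  | [] => simp [pvW1Core, pvSkip]
  | [b] => simp [pvW1Core, pvSkip]
  | b :: c :: ys => simp [pvW1Core]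

lemma pvW1Core_nil_right (x : List Char) : pvW1Core x [] = true ↔ x.length ≤ 1 := by
  match x with
  | [] => simp [pvW1Core, pvSkip]
  | [b] => simp [pvW1Core, pvSkip]
  | b :: c :: xs => simp [pvW1Core]

lemma pvW1Core_cons_cons_eq (a : Char) (xs ys : List Char) :
    pvW1Core (a :: xs) (a :: ys) = pvW1Core xs ys := by
  have hg : (((a :: xs).length : Int) - ((a :: ys).length) > 1 ∨ (((a :: ys).length : Int) - ((a :: xs).length) > 1))
      ↔ ((xs.length : Int) - ys.length > 1 ∨ ((ys.length : Int) - xs.length > 1)) := by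
    simp only [List.length_cons]; push_cast; omega
  by_cases h : ((xs.length : Int) - ys.length > 1 ∨ ((ys.length : Int) - xs.length > 1))
  · rw [pvW1Core, if_pos (hg.mpr h), pvW1Core, if_pos h]
  · rw [pvW1Core, if_neg (fun hc => h (hg.mp hc)), pvW1Core, if_neg h]
    simp [pvSkip]

lemma pvW1Core_cons_cons_ne {a b : Char} (h : a ≠ b) (xs ys : List Char) :
    pvW1Core (a :: xs) (b :: ys) = true ↔ (xs = ys ∨ a :: xs = ys ∨ xs = b :: ys) := by
  rw [pvW1Core]
  split_ifs with hg
  · simp only [false_iff]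
    intro hdis
    have hlen : (xs.length : Int) = ys.length ∨ (xs.length : Int) + 1 = ys.length
        ∨ (xs.length : Int) = ys.length + 1 := by
      rcases hdis with rfl | hh | hh
      · left; rfl
      · right; left; rw [← hh]; simp
      · right; right; rw [hh]; simp
    simp only [List.length_cons] at hg
    push_cast at hg
    omega
  · simp only [pvSkip, if_neg h]
    simp
    tauto

-- key: the DP distance is ≤ 1 exactly when B's scan succeeds
lemma pvLevMath_le_one_iff (x : List Char) : ∀ y, (pvLevMath x y ≤ 1 ↔ pvW1Core x y = true) := by
  induction x with
  | nil =>
    intro y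
    rw [pvW1Core_nil_left]
    simp [pvLevMath]
  | cons a xs ih =>
    intro y
    cases y with
    | nil =>
      rw [pvW1Core_nil_right]
      simp [pvLevMath]
    | cons b ys =>
      by_cases hab : a = b
      · subst hab
        have hz : (if a = a then 0 else 1) = 0 := if_pos rfl
        rw [pvW1Core_cons_cons_eq, ← ih ys, pvLevMath_cons_cons, hz]
        constructor
        · intro h
          rcases Nat.lt_or_ge (pvLevMath xs (a :: ys)) 1 with h1 | h1
          · have := (pvLevMath_eq_zero xs (a :: ys)).mp (by omega)
            subst this
            have := pvLevMath_cons_self a ys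
            omega
          · rcases Nat.lt_or_ge (pvLevMath (a :: xs) ys) 1 with h2 | h2
            · have h2' := (pvLevMath_eq_zero (a :: xs) ys).mp (by omega)
              rw [← h2']
              have := pvLevMath_self_cons a xs
              omega
            · omega
        · intro h; omega
      · have hz : (if a = b then 0 else 1) = 1 := if_neg hab
        rw [pvW1Core_cons_cons_ne hab, pvLevMath_cons_cons, hz]
        have e1 := pvLevMath_eq_zero xs (b :: ys)
        have e2 := pvLevMath_eq_zero (a :: xs) ys
        have e3 := pvLevMath_eq_zero xs ys
        constructor
        · intro h
          rcases Nat.lt_or_ge (pvLevMath xs (b :: ys)) 1 with h1 | h1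
          · exact Or.inr (Or.inr (e1.mp (by omega)))
          · rcases Nat.lt_or_ge (pvLevMath (a :: xs) ys) 1 with h2 | h2
            · exact Or.inr (Or.inl (e2.mp (by omega)))
            · exact Or.inl (e3.mp (by omega))
        · rintro (h | h | h)
          · have := e3.mpr h; omega
          · have := e2.mpr h; omega
          · have := e1.mpr h; omega

-- "one edit apart", the symmetric / reversal-invariant characterization
def pvOneEdit (x y : List Char) : Prop :=
  x = y ∨ (∃ u c d v, x = u ++ c :: v ∧ y = u ++ d :: v)
    ∨ (∃ u c v, x = u ++ v ∧ y = u ++ c :: v)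
    ∨ (∃ u c v, x = u ++ c :: v ∧ y = u ++ v)

lemma pvOneEdit_nil_left (y : List Char) : pvOneEdit [] y ↔ y.length ≤ 1 := by
  constructor
  · rintro (rfl | ⟨u, c, d, v, hx, hy⟩ | ⟨u, c, v, hx, hy⟩ | ⟨u, c, v, hx, hy⟩)
    · simp
    · exact absurd hx (by simp)
    · have hu : u = [] := by cases u <;> simp_all
      have hv : v = [] := by cases u <;> simp_all
      subst hu; subst hv; simp [hy]
    · exact absurd hx (by simp)
  · intro hl
    match y with
    | [] => exact Or.inl rfl
    | [c] => exact Or.inr (Or.inr (Or.inl ⟨[], c, [], rfl, rfl⟩))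

lemma pvOneEdit_symm {x y : List Char} (h : pvOneEdit x y) : pvOneEdit y x := by
  rcases h with rfl | ⟨u, c, d, v, hx, hy⟩ | ⟨u, c, v, hx, hy⟩ | ⟨u, c, v, hx, hy⟩
  · exact Or.inl rfl
  · exact Or.inr (Or.inl ⟨u, d, c, v, hy, hx⟩)
  · exact Or.inr (Or.inr (Or.inr ⟨u, c, v, hy, hx⟩))
  · exact Or.inr (Or.inr (Or.inl ⟨u, c, v, hy, hx⟩))

lemma pvOneEdit_nil_right (x : List Char) : pvOneEdit x [] ↔ x.length ≤ 1 := by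
  constructor
  · intro h; exact (pvOneEdit_nil_left x).mp (pvOneEdit_symm h)
  · intro h; exact pvOneEdit_symm ((pvOneEdit_nil_left x).mpr h)

lemma pvOneEdit_cons_iff (a : Char) (xs ys : List Char) :
    pvOneEdit (a :: xs) (a :: ys) ↔ pvOneEdit xs ys := by
  constructor
  · rintro (heq | ⟨u, c, d, v, hx, hy⟩ | ⟨u, c, v, hx, hy⟩ | ⟨u, c, v, hx, hy⟩)
    · exact Or.inl (by injection heq)
    · cases u with
      | nil =>
        simp at hx hy
        exact Or.inl (hx.2.trans hy.2.symm)
      | cons e u' =>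
        simp at hx hy
        exact Or.inr (Or.inl ⟨u', c, d, v, hx.2, hy.2⟩)
    · cases u with
      | nil =>
        simp at hx hy
        obtain ⟨hc, hv⟩ := hy
        rw [hv, ← hx]
        exact Or.inr (Or.inr (Or.inl ⟨[], a, xs, rfl, rfl⟩))
      | cons e u' =>
        simp at hx hy
        exact Or.inr (Or.inr (Or.inl ⟨u', c, v, hx.2, hy.2⟩))
    · cases u with
      | nil =>
        simp at hx hy
        obtain ⟨hc, hv⟩ := hx
        rw [hv, ← hy]
        exact Or.inr (Or.inr (Or.inr ⟨[], a, ys, rfl, rfl⟩))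
      | cons e u' =>
        simp at hx hy
        exact Or.inr (Or.inr (Or.inr ⟨u', c, v, hx.2, hy.2⟩))
  · rintro (rfl | ⟨u, c, d, v, hx, hy⟩ | ⟨u, c, v, hx, hy⟩ | ⟨u, c, v, hx, hy⟩)
    · exact Or.inl rfl
    · exact Or.inr (Or.inl ⟨a :: u, c, d, v, by simp [hx], by simp [hy]⟩)
    · exact Or.inr (Or.inr (Or.inl ⟨a :: u, c, v, by simp [hx], by simp [hy]⟩))
    · exact Or.inr (Or.inr (Or.inr ⟨a :: u, c, v, by simp [hx], by simp [hy]⟩))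

lemma pvOneEdit_cons_ne_iff {a b : Char} (hab : a ≠ b) (xs ys : List Char) :
    pvOneEdit (a :: xs) (b :: ys) ↔ (xs = ys ∨ a :: xs = ys ∨ xs = b :: ys) := by
  constructor
  · rintro (heq | ⟨u, c, d, v, hx, hy⟩ | ⟨u, c, v, hx, hy⟩ | ⟨u, c, v, hx, hy⟩)
    · exact absurd (by injection heq) hab
    · cases u with
      | nil =>
        simp at hx hy
        exact Or.inl (hx.2.trans hy.2.symm)
      | cons e u' =>
        simp at hx hy
        exact absurd (hx.1.trans hy.1.symm) hab
    · cases u with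
      | nil =>
        simp at hx hy
        subst hx
        exact Or.inr (Or.inl hy.2.symm)
      | cons e u' =>
        simp at hx hy
        exact absurd (hx.1.trans hy.1.symm) hab
    · cases u with
      | nil =>
        simp at hx hy
        subst hy
        exact Or.inr (Or.inr hx.2)
      | cons e u' =>
        simp at hx hy
        exact absurd (hx.1.trans hy.1.symm) hab
  · rintro (rfl | h | rfl)
    · exact Or.inr (Or.inl ⟨[], a, b, xs, rfl, rfl⟩)
    · exact Or.inr (Or.inr (Or.inl ⟨[], b, a :: xs, rfl, by simp [← h]⟩))
    · exact Or.inr (Or.inr (Or.inr ⟨[], a, b :: ys, rfl, rfl⟩))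

lemma pvW1Core_iff_oneEdit (x : List Char) : ∀ y, (pvW1Core x y = true ↔ pvOneEdit x y) := by
  induction x with
  | nil =>
    intro y
    rw [pvW1Core_nil_left, pvOneEdit_nil_left]
  | cons a xs ih =>
    intro y
    cases y with
    | nil => rw [pvW1Core_nil_right, pvOneEdit_nil_right]
    | cons b ys =>
      by_cases hab : a = b
      · subst hab
        rw [pvW1Core_cons_cons_eq, pvOneEdit_cons_iff]
        exact ih ys
      · rw [pvW1Core_cons_cons_ne hab, pvOneEdit_cons_ne_iff hab]

lemma pvOneEdit_rev {x y : List Char} (h : pvOneEdit x y) : pvOneEdit x.reverse y.reverse := by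
  rcases h with rfl | ⟨u, c, d, v, rfl, rfl⟩ | ⟨u, c, v, rfl, rfl⟩ | ⟨u, c, v, rfl, rfl⟩
  · exact Or.inl rfl
  · exact Or.inr (Or.inl ⟨v.reverse, c, d, u.reverse, by simp, by simp⟩)
  · exact Or.inr (Or.inr (Or.inl ⟨v.reverse, c, u.reverse, by simp, by simp⟩))
  · exact Or.inr (Or.inr (Or.inr ⟨v.reverse, c, u.reverse, by simp, by simp⟩))

lemma pvLevMath_nil_right (x : List Char) : pvLevMath x [] = x.length := by
  cases x <;> simp [pvLevMath]

-- the value row of A's DP after i outer iterations: distances of the reversed prefixes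
def pvRow (al bl : List Char) (i : Nat) : List Int :=
  (List.range (al.length + 1)).map
    (fun j => ((pvLevMath ((al.take j).reverse) ((bl.take i).reverse) : Nat) : Int))

lemma pvRow_getD (al bl : List Char) (i j : Nat) (hj : j ≤ al.length) :
    (pvRow al bl i).getD j 0
      = (pvLevMath ((al.take j).reverse) ((bl.take i).reverse) : Int) := by
  unfold pvRow
  rw [List.getD_eq_getElem?_getD, List.getElem?_map, List.getElem?_range (by omega)]
  rfl

lemma pvTake_succ_rev {l : List Char} {i : Nat} (hi : i < l.length) :
    (l.take (i + 1)).reverse = l[i] :: (l.take i).reverse := by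
  rw [List.take_add_one, List.getElem?_eq_getElem hi]
  simp

-- the inner fold fills one DP row
lemma pvInner_fold (al bl : List Char) (i : Nat) (hi : i < bl.length) :
    ∀ k, k ≤ al.length →
      (List.range k).foldl (pvLevInnerStep al (bl.getD i ' ') (pvRow al bl i)) [((i : Int) + 1)]
        = (List.range (k + 1)).map
            (fun j => ((pvLevMath ((al.take j).reverse) ((bl.take (i+1)).reverse) : Nat) : Int)) := by
  intro k
  induction k with
  | zero =>
    intro _
    simp [pvLevMath, List.length_take]
    omega
  | succ k ihk =>
    intro hk
    rw [List.range_succ, List.foldl_append, ihk (by omega), List.foldl_cons, List.foldl_nil]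
    have hbi : bl.getD i ' ' = bl[i] := List.getD_eq_getElem bl ' ' hi
    have hak : al.getD k ' ' = al[k] := List.getD_eq_getElem al ' ' (by omega)
    have hcur : ∀ j, j ≤ k →
        ((List.range (k + 1)).map
          (fun j => ((pvLevMath ((al.take j).reverse) ((bl.take (i+1)).reverse) : Nat) : Int))).getD j 0
        = (pvLevMath ((al.take j).reverse) ((bl.take (i+1)).reverse) : Int) := by
      intro j hjk
      rw [List.getD_eq_getElem?_getD, List.getElem?_map, List.getElem?_range (by omega)]
      rfl
    unfold pvLevInnerStep
    rw [hcur k (by omega), pvRow_getD al bl i (k+1) (by omega), pvRow_getD al bl i k (by omega),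
        hbi, hak]
    conv_rhs => rw [List.range_succ, List.map_append]
    refine congrArg₂ (· ++ ·) rfl ?_
    simp only [List.map_cons, List.map_nil]
    rw [pvTake_succ_rev (show k < al.length by omega), pvTake_succ_rev hi,
        pvLevMath_cons_cons]
    split_ifs with h1 h2 h3
    · exact absurd h2 h1
    · push_cast
      simp only [List.cons.injEq, and_true]
      omega
    · push_cast
      simp only [List.cons.injEq, and_true]
      omega
    · exact absurd h3 h1

-- the outer fold iterates the rows
lemma pvOuter_fold (al bl : List Char) :
    ∀ i, i ≤ bl.length →
      (List.range i).foldl (fun previous i =>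
          (List.range al.length).foldl (pvLevInnerStep al (bl.getD i ' ') previous) [((i : Int) + 1)])
        ((List.range (al.length + 1)).map (fun k => Int.ofNat k))
      = pvRow al bl i := by
  intro i
  induction i with
  | zero =>
    intro _
    rw [List.range_zero, List.foldl_nil]
    unfold pvRow
    apply List.map_congr_left
    intro j hj
    rw [List.mem_range] at hj
    rw [List.take_zero, List.reverse_nil, pvLevMath_nil_right]
    simp only [Int.ofNat_eq_natCast, List.length_reverse, List.length_take]
    omega
  | succ i ihi =>
    intro hi
    rw [show List.range (i+1) = List.range i ++ [i] from List.range_succ,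
        List.foldl_append, ihi (by omega), List.foldl_cons, List.foldl_nil]
    exact pvInner_fold al bl i (by omega) al.length (le_refl _)

-- A's pvLev equals the recursive distance of the (possibly swapped) reversed inputs
lemma pvLev_eq_math (a b : String) :
    pvLev a b = (if a.toList.length > b.toList.length
      then (pvLevMath b.toList.reverse a.toList.reverse : Int)
      else (pvLevMath a.toList.reverse b.toList.reverse : Int)) := by
  unfold pvLev
  split_ifs with h
  · simp only [if_pos h]
    rw [pvOuter_fold b.toList a.toList a.toList.length (le_refl _),
        pvRow_getD b.toList a.toList a.toList.length b.toList.length (le_refl _)]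
    rw [List.take_length, List.take_length]
  · simp only [if_neg h]
    rw [pvOuter_fold a.toList b.toList b.toList.length (le_refl _),
        pvRow_getD a.toList b.toList b.toList.length a.toList.length (le_refl _)]
    rw [List.take_length, List.take_length]

lemma pvLev_lt_two_iff (a b : String) : pvLev a b < 2 ↔ pvWithin1 a b = true := by
  rw [pvLev_eq_math, pvWithin1]
  have core : ∀ x y : List Char, (pvLevMath x.reverse y.reverse : Int) < 2 ↔ pvW1Core x y = true := by
    intro x y
    have h1 : (pvLevMath x.reverse y.reverse : Int) < 2 ↔ pvLevMath x.reverse y.reverse ≤ 1 := by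
      omega
    rw [h1, pvLevMath_le_one_iff, pvW1Core_iff_oneEdit, pvW1Core_iff_oneEdit]
    constructor
    · intro h
      have := pvOneEdit_rev h
      simpa using this
    · intro h
      exact pvOneEdit_rev h
  split_ifs with h
  · rw [core b.toList a.toList, pvW1Core_iff_oneEdit, pvW1Core_iff_oneEdit]
    exact ⟨fun hh => pvOneEdit_symm hh, fun hh => pvOneEdit_symm hh⟩
  · exact core a.toList b.toList

-- the two loops agree when A's pre-scan results are the first matches of the remaining suffix
lemma pv_loop_eq (tokens : List String) : ∀ (rest : List String) (i : Nat),
    pvGetOrgLoop tokens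
      (rest.find? (fun t => decide (pvLev t "durante" < 2)))
      (rest.find? (fun t => decide (pvLev t "realizado" < 2))) rest i
    = pvAltLoop tokens rest i := by
  intro rest
  induction rest with
  | nil => intro i; rfl
  | cons t rs ih =>
    intro i
    by_cases hd : pvLev t "durante" < 2
    · have hb : pvWithin1 t "durante" = true := (pvLev_lt_two_iff t "durante").mp hd
      simp [pvGetOrgLoop, pvAltLoop, List.find?, hd, hb]
    · by_cases hr : pvLev t "realizado" < 2
      · have hb : pvWithin1 t "realizado" = true := (pvLev_lt_two_iff t "realizado").mp hr
        simp [pvGetOrgLoop, pvAltLoop, List.find?, hd, hr, hb]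
      · have hcondA : ¬ (some t = rs.find? (fun t => decide (pvLev t "durante" < 2)) ∨
                         some t = rs.find? (fun t => decide (pvLev t "realizado" < 2))) := by
          rintro (h | h)
          · have := List.find?_some h.symm
            simp at this; omega
          · have := List.find?_some h.symm
            simp at this; omega
        have hd' : decide (pvLev t "durante" < 2) = false := by simpa using hd
        have hr' : decide (pvLev t "realizado" < 2) = false := by simpa using hr
        have hbd : pvWithin1 t "durante" = false := by
          have := pvLev_lt_two_iff t "durante"; simp_all
        have hbr : pvWithin1 t "realizado" = false := by
          have := pvLev_lt_two_iff t "realizado"; simp_all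
        simp only [pvGetOrgLoop, pvAltLoop, List.find?_cons, hd', hr', hbd, hbr]
        rw [if_neg hcondA, if_neg (by simp)]
        exact ih (i + 1)

-- ===== VERDICT (by name: the statement is the Claim_ definition above) =====
theorem getOrganizador_spec : Claim_equal_getOrganizador := by
  intro tokens _ _
  unfold Spec_getOrganizador getOrganizador getOrganizador_alt pvVerificaSimilaridade
  exact pv_loop_eq tokens tokens 0
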